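-- pv_equiv track=rewrite | github.com/gabriel-limaf/vesting_calendar_api | main.py | back_loaded
-- ===== SOURCE A (Python) =====
-- import math
--
-- def back_loaded(total_acoes, tranche_sem_cliff, tranches_no_cliff, cliff):
--     lista_acoes_na_tranche = []
--     for _ in range(tranche_sem_cliff):
--         acoes_na_tranche = math.floor(total_acoes / tranche_sem_cliff)
--         lista_acoes_na_tranche.append(acoes_na_tranche)
--     sobra = total_acoes - sum(lista_acoes_na_tranche)
--     idx = len(lista_acoes_na_tranche) - 1
--     while sobra > 0:
--         lista_acoes_na_tranche[idx] += 1
--         sobra -= 1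
--         idx -= 1
--         if idx < cliff:
--             idx = len(lista_acoes_na_tranche) - 1
--     soma_acoes_no_cliff = sum(lista_acoes_na_tranche[:tranches_no_cliff])
--     nova_lista = [soma_acoes_no_cliff] + lista_acoes_na_tranche[tranches_no_cliff:]
--     return nova_lista
-- ===== SOURCE B (Python) =====
-- def back_loaded(total_acoes, tranche_sem_cliff, tranches_no_cliff, cliff):
--     n = tranche_sem_cliff
--     base = [total_acoes // n] * n if n > 0 else []
--     sobra = total_acoes - (base[0] * n if base else 0)
--     lst = base
--     if sobra > 0:
--         lo = max(cliff, 0)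
--         m = n - lo
--         if m <= 0:
--             lst = base[:-1] + [base[-1] + sobra]
--         else:
--             q, r = divmod(sobra, m)
--             lst = [v + (q if i >= lo else 0) + (1 if i >= n - r else 0)
--                    for i, v in enumerate(base)]
--     head = sum(lst[:tranches_no_cliff])
--     return [head] + lst[tranches_no_cliff:]
-- ===== Notes on version B (the rewrite author's own statement) =====
-- stated objective: alternative
-- what changed: Replaces A's one-share-at-a-time cyclic while loop over the tranche list by a closed-form divmod distribution of the remainder (each post-cliff tranche gets sobra//m, the last sobra%m tranches one extra), computed in a single comprehension.
import Mathlib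
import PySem

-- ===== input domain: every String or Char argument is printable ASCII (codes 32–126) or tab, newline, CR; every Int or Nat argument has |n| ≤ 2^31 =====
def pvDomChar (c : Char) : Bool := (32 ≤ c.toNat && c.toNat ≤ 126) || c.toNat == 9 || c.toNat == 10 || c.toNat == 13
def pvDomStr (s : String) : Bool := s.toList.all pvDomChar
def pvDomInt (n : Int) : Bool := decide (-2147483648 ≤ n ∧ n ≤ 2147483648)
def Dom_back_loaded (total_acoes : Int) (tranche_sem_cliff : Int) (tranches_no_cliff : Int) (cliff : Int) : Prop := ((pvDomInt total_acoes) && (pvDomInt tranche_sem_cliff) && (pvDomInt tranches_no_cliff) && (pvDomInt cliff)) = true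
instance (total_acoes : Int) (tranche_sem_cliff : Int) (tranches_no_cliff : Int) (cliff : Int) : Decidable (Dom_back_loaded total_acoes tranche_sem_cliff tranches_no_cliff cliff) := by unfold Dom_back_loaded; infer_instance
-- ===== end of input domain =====

-- B replaces A's one-share-at-a-time cyclic while loop by a closed-form divmod distribution
-- of the remainder (objective: alternative; same return value on all of Pre_).

-- ===== PORT A =====
-- A's while loop: `lista[idx] += 1; sobra -= 1; idx -= 1; if idx < cliff: idx = len-1`.
-- pyGetD/pySetD are used for `lista[idx]` (Python wrap semantics); the IndexError case
-- (empty list with sobra > 0) is excluded by Pre_back_loaded.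
def pvAwhile (lista : List Int) (sobra : Int) (idx : Int) (cliff : Int) : List Int :=
  if h : 0 < sobra then
    let lista' := PySem.List.pySetD lista idx (PySem.List.pyGetD lista idx 0 + 1)
    let idx' := idx - 1
    let idx'' := if idx' < cliff then (lista'.length : Int) - 1 else idx'
    pvAwhile lista' (sobra - 1) idx'' cliff
  else lista
termination_by sobra.toNat
decreasing_by omega

def back_loaded (total_acoes : Int) (tranche_sem_cliff : Int) (tranches_no_cliff : Int) (cliff : Int) : List Int :=
  -- `math.floor(total_acoes / tranche_sem_cliff)` (float division then floor) is ported as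
  -- floor division: exact on Dom, where |arguments| ≤ 2^31 so the double quotient never
  -- rounds across an integer boundary.
  let lista := (PySem.List.pyRange 0 tranche_sem_cliff 1).foldl
      (fun acc _ => acc ++ [PySem.Int.floordiv total_acoes tranche_sem_cliff]) []
  let sobra := total_acoes - lista.sum
  let idx := (lista.length : Int) - 1
  let lista2 := pvAwhile lista sobra idx cliff
  let soma := (PySem.List.slice lista2 none (some tranches_no_cliff)).sum
  soma :: PySem.List.slice lista2 (some tranches_no_cliff) none

-- ===== PORT B =====
def back_loaded_alt (total_acoes : Int) (tranche_sem_cliff : Int) (tranches_no_cliff : Int) (cliff : Int) : List Int :=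
  let n := tranche_sem_cliff
  let base : List Int :=
    if 0 < n then List.replicate n.toNat (PySem.Int.floordiv total_acoes n) else []
  let sobra := total_acoes - (match base with | [] => 0 | x :: _ => x * n)
  let lst :=
    if 0 < sobra then
      let lo := max cliff 0
      let m := n - lo
      if m ≤ 0 then
        PySem.List.slice base none (some (-1)) ++ [PySem.List.pyGetD base (-1) 0 + sobra]
      else
        let q := PySem.Int.floordiv sobra m
        let r := PySem.Int.mod sobra m
        (PySem.List.enumerate base 0).map (fun p =>
          p.2 + (if lo ≤ p.1 then q else 0) + (if n - r ≤ p.1 then 1 else 0))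
    else base
  let head := (PySem.List.slice lst none (some tranches_no_cliff)).sum
  head :: PySem.List.slice lst (some tranches_no_cliff) none

-- ===== PRECONDITION & SPEC =====
-- Pre_ excludes exactly the inputs on which A raises IndexError: tranche_sem_cliff ≤ 0
-- together with total_acoes > 0 (empty tranche list but a positive remainder).
def Pre_back_loaded (total_acoes : Int) (tranche_sem_cliff : Int) (tranches_no_cliff : Int) (cliff : Int) : Prop :=
  0 < tranche_sem_cliff ∨ total_acoes ≤ 0
instance (total_acoes : Int) (tranche_sem_cliff : Int) (tranches_no_cliff : Int) (cliff : Int) : Decidable (Pre_back_loaded total_acoes tranche_sem_cliff tranches_no_cliff cliff) := by unfold Pre_back_loaded; infer_instance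

def pvWitness_back_loaded : Int × Int × Int × Int := (10, 4, 2, 1)

def Spec_back_loaded (total_acoes : Int) (tranche_sem_cliff : Int) (tranches_no_cliff : Int) (cliff : Int) (out : List Int) : Prop := out = back_loaded_alt total_acoes tranche_sem_cliff tranches_no_cliff cliff
instance (total_acoes : Int) (tranche_sem_cliff : Int) (tranches_no_cliff : Int) (cliff : Int) (out : List Int) : Decidable (Spec_back_loaded total_acoes tranche_sem_cliff tranches_no_cliff cliff out) := by unfold Spec_back_loaded; infer_instance

-- ===== CLAIM (what is proved, stated in full; the proofs are below) =====
def Claim_equal_back_loaded : Prop := ∀ (total_acoes : Int) (tranche_sem_cliff : Int) (tranches_no_cliff : Int) (cliff : Int), Dom_back_loaded total_acoes tranche_sem_cliff tranches_no_cliff cliff → Pre_back_loaded total_acoes tranche_sem_cliff tranches_no_cliff cliff → Spec_back_loaded total_acoes tranche_sem_cliff tranches_no_cliff cliff (back_loaded total_acoes tranche_sem_cliff tranches_no_cliff cliff)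

-- ===== LEMMAS AND PROOFS =====

-- proof-only model of A's while loop: the sequence of visited indices
def pvNext (n cliff i : Int) : Int := if i - 1 < cliff then n - 1 else i - 1

def pvIter (n cliff : Int) : Nat → Int → Int
  | 0, i => i
  | k+1, i => pvIter n cliff k (pvNext n cliff i)

def pvVisit (n cliff : Int) : Nat → Int → List Int
  | 0, _ => []
  | k+1, i => i :: pvVisit n cliff k (pvNext n cliff i)

def pvApply (L v : List Int) : List Int :=
  v.foldl (fun acc j => PySem.List.pySetD acc j (PySem.List.pyGetD acc j 0 + 1)) L

theorem pvAwhile_eq_apply (k : Nat) : ∀ (L : List Int) (s i cliff : Int), s.toNat = k →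
    pvAwhile L s i cliff = pvApply L (pvVisit (L.length : Int) cliff k i) := by
  induction k with
  | zero =>
    intro L s i cliff hk
    rw [pvAwhile]
    rw [dif_neg (by omega)]
    simp [pvVisit, pvApply]
  | succ k ih =>
    intro L s i cliff hk
    rw [pvAwhile, dif_pos (by omega)]
    rw [ih _ (s-1) _ cliff (by omega)]
    simp only [PySem.List.length_pySetD, pvVisit, pvApply, List.foldl_cons, pvNext]

theorem pvIter_succ' (n cliff : Int) (k : Nat) : ∀ i : Int,
    pvIter n cliff (k+1) i = pvNext n cliff (pvIter n cliff k i) := by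
  induction k with
  | zero => intro i; rfl
  | succ k ih => intro i; rw [pvIter, ih, pvIter]

theorem pvVisit_append (n cliff : Int) (a : Nat) : ∀ (b : Nat) (i : Int),
    pvVisit n cliff (a + b) i = pvVisit n cliff a i ++ pvVisit n cliff b (pvIter n cliff a i) := by
  induction a with
  | zero => intro b i; simp [pvVisit, pvIter]
  | succ a ih =>
    intro b i
    have : a + 1 + b = (a + b) + 1 := by omega
    rw [this, pvVisit, pvVisit, ih, pvIter]
    simp

theorem pvVisit_descent (n cliff : Int) : ∀ (k : Nat) (i : Int),
    (∀ t : Nat, 1 ≤ t → (t : Int) ≤ (k : Int) - 1 → cliff ≤ i - t) →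
    pvVisit n cliff k i = (List.range k).map (fun t : Nat => i - (t : Int)) := by
  intro k
  induction k with
  | zero => intro i h; simp [pvVisit]
  | succ k ih =>
    intro i h
    rw [pvVisit]
    rcases Nat.eq_zero_or_pos k with hk | hk
    · subst hk; simp [pvVisit]
    · have hnext : pvNext n cliff i = i - 1 := by
        rw [pvNext, if_neg]
        have := h 1 (by omega) (by push_cast; omega)
        push_cast at this ⊢; omega
      rw [hnext, ih (i-1) (by
        intro t h1 h2
        have := h (t+1) (by omega) (by push_cast at h2 ⊢; omega)
        push_cast at this ⊢; omega)]
      rw [List.range_succ_eq_map]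
      simp only [List.map_cons, List.map_map]
      refine List.cons_eq_cons.mpr ⟨by simp, ?_⟩
      apply List.map_congr_left; intro t ht; simp; push_cast; ring

theorem pvIter_descent (n cliff : Int) : ∀ (k : Nat) (i : Int),
    (∀ t : Nat, (t : Int) < (k : Int) → cliff ≤ i - t - 1) →
    pvIter n cliff k i = i - k := by
  intro k
  induction k with
  | zero => intro i h; simp [pvIter]
  | succ k ih =>
    intro i h
    rw [pvIter]
    have hnext : pvNext n cliff i = i - 1 := by
      rw [pvNext, if_neg]
      have := h 0 (by push_cast; omega)
      push_cast at this ⊢; omega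
    rw [hnext, ih (i-1) (by
      intro t ht
      have := h (t+1) (by push_cast at ht ⊢; omega)
      push_cast at this ⊢; omega)]
    push_cast; ring

theorem count_descent : ∀ (k : Nat) (i j : Int),
    ((List.range k).map (fun t : Nat => i - (t : Int))).count j = if i - k < j ∧ j ≤ i then 1 else 0 := by
  intro k
  induction k with
  | zero => intro i j; simp
  | succ k ih =>
    intro i j
    rw [List.range_succ, List.map_append, List.count_append, ih]
    simp only [List.map_cons, List.map_nil, List.count_singleton]
    push_cast
    by_cases h1 : i - k < j ∧ j ≤ i <;> by_cases h2 : j = i - k <;>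
      · simp only [beq_iff_eq]
        push_cast
        split_ifs <;> omega

theorem pvIter_cycle (n cliff lo : Int) (hn : 1 ≤ n)
    (hlo : lo = max 0 (min cliff (n-1))) (hlo1 : 1 ≤ lo) :
    pvIter n cliff (n - lo).toNat (n-1) = n - 1 := by
  have hm : 1 ≤ n - lo := by omega
  have hkk : (n - lo).toNat = ((n-lo).toNat - 1) + 1 := by omega
  rw [hkk, pvIter_succ']
  have hdesc : pvIter n cliff ((n-lo).toNat - 1) (n-1) = (n-1) - ((n-lo).toNat - 1 : Nat) := by
    apply pvIter_descent
    intro t ht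
    -- cliff = lo when 2 ≤ n - lo; when n - lo = 1 the range of t is empty
    have h2 : (2:Int) ≤ n - lo ∨ (n - lo) = 1 := by omega
    rcases h2 with h2 | h2
    · have hcl : cliff = lo := by omega
      push_cast at ht ⊢
      omega
    · push_cast at ht; omega
  rw [hdesc, pvNext]
  rw [if_pos (by push_cast; omega)]

theorem pvVisit_count (n cliff lo : Int) (hn : 1 ≤ n) (hlo : lo = max 0 (min cliff (n-1))) :
    ∀ (s : Nat), (s : Int) < n → ∀ j : Int,
    ((pvVisit n cliff s (n-1)).count j : Int) =
      (if lo ≤ j ∧ j ≤ n - 1 then ((s / (n-lo).toNat : Nat) : Int) else 0) +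
      (if n - ((s % (n-lo).toNat : Nat) : Int) ≤ j ∧ j ≤ n - 1 then 1 else 0) := by
  intro s
  induction s using Nat.strong_induction_on with
  | _ s ih =>
  intro hs j
  set mN := (n - lo).toNat with hmN
  have hlo0 : 0 ≤ lo := by omega
  have hloN : lo ≤ n - 1 := by omega
  by_cases hcase : s < mN
  · -- no full cycle: pure descent
    have hq : s / mN = 0 := Nat.div_eq_of_lt hcase
    have hr : s % mN = s := Nat.mod_eq_of_lt hcase
    rw [pvVisit_descent n cliff s (n-1) (by
      intro t h1 h2
      -- need cliff ≤ n - 1 - t for 1 ≤ t ≤ s - 1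
      have h2' : (t:Int) ≤ (s:Int) - 1 := h2
      have hcl : cliff ≤ lo ∨ n - lo = 1 := by omega
      rcases hcl with hcl | hcl
      · omega
      · omega)]
    rw [count_descent, hq, hr]
    simp only [Nat.cast_zero]
    split_ifs <;> omega
  · -- peel one full cycle
    have hm1 : 1 ≤ mN := by omega
    have hdecomp : s = mN + (s - mN) := by omega
    have hlo1 : 1 ≤ lo := by omega
    have hvv : pvVisit n cliff s (n-1)
        = pvVisit n cliff mN (n-1) ++ pvVisit n cliff (s - mN) (n-1) := by
      conv_lhs => rw [hdecomp]
      rw [pvVisit_append, pvIter_cycle n cliff lo hn hlo hlo1]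
    rw [hvv, List.count_append]
    have hcyc : pvVisit n cliff mN (n-1) = (List.range mN).map (fun t : Nat => (n-1) - (t:Int)) := by
      apply pvVisit_descent
      intro t h1 h2
      have hcl : cliff = lo ∨ n - lo = 1 := by omega
      rcases hcl with hcl | hcl <;> omega
    rw [hcyc, count_descent]
    have ihs := ih (s - mN) (by omega) (by push_cast; omega) j
    push_cast [ihs]
    have hdiv : (s - mN) / mN + 1 = s / mN := by
      conv_rhs => rw [Nat.div_eq]
      rw [if_pos ⟨by omega, by omega⟩]
    have hmod : (s - mN) % mN = s % mN := by
      conv_rhs => rw [Nat.mod_eq]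
      rw [if_pos ⟨by omega, by omega⟩]
    have hdiv' : ((s - mN : Nat) : Int) / (mN : Int) + 1 = ((s : Nat) : Int) / (mN : Int) := by
      exact_mod_cast hdiv
    have hmod' : ((s - mN : Nat) : Int) % (mN : Int) = ((s : Nat) : Int) % (mN : Int) := by
      exact_mod_cast hmod
    have hmm : (mN : Int) = n - lo := by omega
    simp only [← hdiv', ← hmod']
    split_ifs <;> omega

theorem pvApply_getElem? : ∀ (v L : List Int), (∀ j ∈ v, 0 ≤ j ∧ j < (L.length : Int)) →
    ∀ t : Nat, (pvApply L v)[t]? = L[t]?.map (fun x => x + (v.count (t : Int) : Int)) := by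
  intro v
  induction v with
  | nil =>
    intro L h t
    simp [pvApply]
  | cons j v ih =>
    intro L h t
    obtain ⟨hj0, hjlen⟩ := h j (by simp)
    have hjN : j.toNat < L.length := by omega
    have hset : PySem.List.pySetD L j (PySem.List.pyGetD L j 0 + 1)
        = L.set j.toNat (L[j.toNat] + 1) := by
      rw [PySem.List.pySetD_of_nonneg _ _ hj0, PySem.List.pyGetD_eq_getElem _ _ hj0 hjlen]
    have happ : pvApply L (j :: v) = pvApply (L.set j.toNat (L[j.toNat] + 1)) v := by
      simp [pvApply, hset]
    rw [happ, ih _ (by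
      intro x hx
      have := h x (by simp [hx])
      simpa using this) t]
    rw [List.count_cons]
    by_cases hjt : j = (t : Int)
    · have htj : t = j.toNat := by omega
      subst htj
      rw [List.getElem?_set_self (by omega)]
      rw [if_pos (by simp only [beq_iff_eq]; omega)]
      rw [List.getElem?_eq_getElem hjN]
      simp only [Option.map_some]
      congr 1
      push_cast
      ring
    · have htj : j.toNat ≠ t := by omega
      rw [List.getElem?_set_ne htj]
      rw [if_neg (by simp; omega)]
      simp

theorem pvEnumGetElem? {α : Type} : ∀ (xs : List α) (s : Int) (t : Nat),
    (PySem.List.enumerate xs s)[t]? = xs[t]?.map (fun x => (s + t, x)) := by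
  intro xs
  induction xs with
  | nil => intro s t; simp [PySem.List.enumerate_nil]
  | cons x xs ih =>
    intro s t
    rw [PySem.List.enumerate_cons]
    cases t with
    | zero => simp
    | succ t =>
      simp only [List.getElem?_cons_succ, ih]
      cases xs[t]? <;> simp
      push_cast
      ring

theorem pvMidEq (n cliff a s : Int) (hn : 0 < n) (hs0 : 0 < s) (hsn : s < n) :
    pvAwhile (List.replicate n.toNat a) s (n - 1) cliff =
      (if n - max cliff 0 ≤ 0 then
        (List.replicate n.toNat a).dropLast ++ [a + s]
      else
        (PySem.List.enumerate (List.replicate n.toNat a) 0).map (fun p =>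
          p.2 + (if max cliff 0 ≤ p.1 then PySem.Int.floordiv s (n - max cliff 0) else 0) +
          (if n - PySem.Int.mod s (n - max cliff 0) ≤ p.1 then 1 else 0))) := by
  have hNn : ((n.toNat : Nat) : Int) = n := Int.toNat_of_nonneg (by omega)
  set N := n.toNat with hN
  set lo := max 0 (min cliff (n-1)) with hlo
  have hlen : ((List.replicate N a).length : Int) = n := by simp [hNn]
  have hcnt := pvVisit_count n cliff lo hn hlo s.toNat (by omega)
  have hmodlt : s.toNat % (n - lo).toNat < (n - lo).toNat := Nat.mod_lt _ (by omega)
  have hmem : ∀ j ∈ pvVisit n cliff s.toNat (n-1), 0 ≤ j ∧ j < ((List.replicate N a).length : Int) := by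
    intro j hj
    have hpos : 0 < (pvVisit n cliff s.toNat (n-1)).count j := List.count_pos_iff.mpr hj
    have := hcnt j
    rw [hlen]
    constructor
    · by_contra hc
      rw [if_neg (by omega), if_neg (by omega)] at this
      omega
    · by_contra hc
      rw [if_neg (by omega), if_neg (by omega)] at this
      omega
  have hA : pvAwhile (List.replicate N a) s (n - 1) cliff
      = pvApply (List.replicate N a) (pvVisit n cliff s.toNat (n-1)) := by
    rw [pvAwhile_eq_apply s.toNat _ s _ cliff rfl, hlen]
  rw [hA]
  by_cases hcl : n - max cliff 0 ≤ 0
  · -- all remainder goes to the last tranche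
    rw [if_pos hcl]
    have hloval : lo = n - 1 := by omega
    have hm1 : (n - lo).toNat = 1 := by omega
    apply List.ext_getElem?
    intro t
    rw [pvApply_getElem? _ _ hmem t, List.dropLast_replicate]
    rw [List.getElem?_replicate]
    by_cases ht : t < N
    · rw [if_pos ht]
      have hBt : (List.replicate (N-1) a ++ [a + s])[t]? =
          some (if t = N - 1 then a + s else a) := by
        by_cases ht1 : t < N - 1
        · rw [List.getElem?_append_left (by simp; omega), List.getElem?_replicate, if_pos ht1,
            if_neg (by omega)]
        · have : t - (List.replicate (N-1) a).length = 0 := by simp; omega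
          rw [List.getElem?_append_right (by simp; omega), this]
          simp
          omega
      rw [hBt]
      simp only [Option.map_some]
      congr 1
      rw [hcnt, hm1]
      simp only [Nat.div_one, Nat.mod_one, Nat.cast_zero, hloval]
      split_ifs <;> push_cast <;> omega
    · rw [if_neg ht]
      have : (List.replicate (N-1) a ++ [a + s])[t]? = none := by
        rw [List.getElem?_eq_none_iff]
        simp
        omega
      rw [this]
      simp
  · -- cyclic distribution over [max cliff 0, n-1]
    rw [if_neg hcl]
    have hloval : lo = max cliff 0 := by omega
    have hmpos : (0:Int) < n - lo := by omega
    have h1 : s = ((s.toNat : Nat) : Int) := by omega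
    have h2 : n - lo = (((n - lo).toNat : Nat) : Int) := by omega
    have hq : PySem.Int.floordiv s (n - max cliff 0) = ((s.toNat / (n - lo).toNat : Nat) : Int) := by
      rw [← hloval, h1, h2, PySem.Int.floordiv_natCast]; simp
    have hr : PySem.Int.mod s (n - max cliff 0) = ((s.toNat % (n - lo).toNat : Nat) : Int) := by
      rw [← hloval, h1, h2, PySem.Int.mod_natCast]; simp
    apply List.ext_getElem?
    intro t
    rw [pvApply_getElem? _ _ hmem t, List.getElem?_map, pvEnumGetElem?, List.getElem?_replicate]
    by_cases ht : t < N
    · rw [if_pos ht]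
      simp only [Option.map_some]
      congr 1
      rw [hcnt, hq, hr]
      simp only [zero_add, ← hloval]
      split_ifs <;> push_cast <;> omega
    · rw [if_neg ht]
      simp

theorem pvMain_pos (total n tc cliff : Int) (hn : 0 < n) :
    back_loaded total n tc cliff = back_loaded_alt total n tc cliff := by
  have hNn : ((n.toNat : Nat) : Int) = n := Int.toNat_of_nonneg (by omega)
  have hNpos : 0 < n.toNat := by omega
  simp only [back_loaded, back_loaded_alt]
  rw [if_pos hn]
  set a := PySem.Int.floordiv total n with ha
  set N := n.toNat with hN
  have hL : List.foldl (fun acc _ => acc ++ [a]) ([]:List Int) (PySem.List.pyRange 0 n 1)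
      = List.replicate N a := by
    rw [PySem.List.foldl_append_singleton_eq_map (fun _ => a)]
    rw [List.map_const', PySem.List.length_pyRange_one]
    simp
    omega
  rw [hL]
  have hmatch : (match List.replicate N a with | [] => (0:Int) | x :: _ => x * n) = a * n := by
    have : N = (N - 1) + 1 := by omega
    rw [this, List.replicate_succ]
  rw [hmatch]
  have hsum : (List.replicate N a).sum = (N:Int) * a := by
    rw [List.sum_replicate]; exact nsmul_eq_mul N a
  have hsobra : total - (List.replicate N a).sum = PySem.Int.mod total n := by
    rw [hsum, hNn]
    have := PySem.Int.floordiv_mul_add_mod total n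
    rw [← ha] at this
    linarith
  rw [hsobra]
  have hsobra2 : total - a * n = PySem.Int.mod total n := by
    have := PySem.Int.floordiv_mul_add_mod total n
    rw [← ha] at this
    linarith
  rw [hsobra2]
  set s := PySem.Int.mod total n with hs
  have hs0 : 0 ≤ s := PySem.Int.mod_nonneg total hn
  have hsn : s < n := PySem.Int.mod_lt total hn
  have hidx : ((List.replicate N a).length : Int) - 1 = n - 1 := by simp [hNn]
  rw [hidx]
  by_cases hspos : 0 < s
  · rw [if_pos hspos]
    rw [pvMidEq n cliff a s hn hspos hsn]
    by_cases hcl : n - max cliff 0 ≤ 0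
    · rw [if_pos hcl, if_pos hcl]
      rw [PySem.List.slice_to_neg_one,
        PySem.List.pyGetD_neg_one _ _ (by simp; omega), List.getLast_replicate]
    · rw [if_neg hcl, if_neg hcl]
  · rw [if_neg hspos]
    have hs00 : s = 0 := by omega
    rw [pvAwhile_eq_apply 0 _ s _ cliff (by omega)]
    simp [pvVisit, pvApply]

theorem pvMain_nonpos (total n tc cliff : Int) (hn : ¬ 0 < n) (ht : total ≤ 0) :
    back_loaded total n tc cliff = back_loaded_alt total n tc cliff := by
  simp only [back_loaded, back_loaded_alt]
  rw [if_neg hn]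
  have hL : List.foldl (fun acc _ => acc ++ [PySem.Int.floordiv total n]) ([]:List Int)
      (PySem.List.pyRange 0 n 1) = [] := by
    rw [PySem.List.pyRange_one_eq_nil (by omega)]
    rfl
  rw [hL]
  have hA : pvAwhile [] (total - ([] : List Int).sum) (([] : List Int).length - 1) cliff = [] := by
    rw [pvAwhile_eq_apply 0 _ _ _ cliff (by simp; omega)]
    simp [pvVisit, pvApply]
  rw [hA]
  rw [if_neg (by simp; omega)]

-- ===== VERDICT (by name: the statement is the Claim_ definition above) =====
theorem back_loaded_spec : Claim_equal_back_loaded := by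
  unfold Claim_equal_back_loaded Spec_back_loaded
  intro total n tc cliff _ hpre
  by_cases hn : 0 < n
  · exact pvMain_pos total n tc cliff hn
  · exact pvMain_nonpos total n tc cliff hn (by rcases hpre with h | h <;> omega)
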